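-- pv_equiv track=rewrite | github.com/animeshokhade/dsa | scaler/Matrix And Queries.py | solve
-- ===== SOURCE A (Python) =====
-- def solve(A, B):
--     process = [[0] * A for _ in range(A)]
--     rows = len(B)
--     ans = []
--     mod = pow(10, 9) + 7
--
--     for row in range(rows):
--         if B[row][0] == 1:
--             summ = 0
--             for a in range(A):
--                 summ += sum(process[a])
--                 summ %= mod
--             ans.append(summ)
--
--         elif B[row][0] == 2:
--             r = B[row][1] - 1
--             c = B[row][2] - 1
--             process[r][c] = 1 - process[r][c]
--
--         elif B[row][0] == 3:
--             r = B[row][1] - 1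
--             for c in range(A):
--                 process[r][c] ^= 1
--
--     return ans
--     '''
--     TC: O(A^2 * Q)
--     SC: O(A^2)
--     '''
-- ===== SOURCE B (Python) =====
-- def solve(A, B):
--     # Maintain a running count of ones, updated at each toggle, so a sum
--     # query just reads it instead of rescanning the whole matrix.
--     mod = 10 ** 9 + 7
--     grid = [[0] * A for _ in range(A)]
--     total = 0
--     ans = []
--     for q in B:
--         t = q[0]
--         if t == 1:
--             ans.append(total % mod)
--         elif t == 2:
--             r = q[1] - 1
--             c = q[2] - 1
--             grid[r][c] ^= 1
--             total += 1 if grid[r][c] else -1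
--         elif t == 3:
--             r = q[1] - 1
--             for c in range(A):
--                 grid[r][c] ^= 1
--                 total += 1 if grid[r][c] else -1
--     return ans
-- ===== Notes on version B (the rewrite author's own statement) =====
-- stated objective: alternative
-- what changed: B maintains a running count of ones, updated at each toggle, and a sum query just reads it modulo 1e9+7, instead of A's full nested rescan of all A^2 cells per sum query; Pre_ excludes only the inputs on which A raises (empty/short query rows or out-of-range indices).
import Mathlib
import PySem

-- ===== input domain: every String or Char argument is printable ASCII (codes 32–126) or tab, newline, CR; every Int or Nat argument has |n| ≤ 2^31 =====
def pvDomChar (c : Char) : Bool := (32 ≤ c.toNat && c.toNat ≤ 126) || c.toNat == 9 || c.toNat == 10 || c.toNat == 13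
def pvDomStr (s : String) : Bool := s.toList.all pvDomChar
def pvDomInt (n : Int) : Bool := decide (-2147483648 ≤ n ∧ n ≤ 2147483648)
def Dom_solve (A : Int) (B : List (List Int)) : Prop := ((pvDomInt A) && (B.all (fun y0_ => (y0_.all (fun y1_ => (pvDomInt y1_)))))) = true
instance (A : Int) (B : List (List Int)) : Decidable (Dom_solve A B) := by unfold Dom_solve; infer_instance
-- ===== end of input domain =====

-- B maintains a running count of ones at each toggle and answers a sum query from it, instead of A's full matrix rescan per query (objective: alternative).

-- ===== PORT A =====
-- one iteration of A's 'for row in range(rows)' loop; state = (process, ans)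
def solveStepA (A : Int) (st : List (List Int) × List Int) (q : List Int) : List (List Int) × List Int :=
  let process := st.1
  let ans := st.2
  let md : Int := 1000000007
  if PySem.List.pyGetD q 0 0 = 1 then
    -- summ loop: summ += sum(process[a]); summ %= mod
    let summ := (PySem.List.pyRange 0 A 1).foldl
      (fun s a => PySem.Int.mod (s + (PySem.List.pyGetD process a []).sum) md) 0
    (process, ans ++ [summ])
  else if PySem.List.pyGetD q 0 0 = 2 then
    let r := PySem.List.pyGetD q 1 0 - 1
    let c := PySem.List.pyGetD q 2 0 - 1
    let row := PySem.List.pyGetD process r []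
    (PySem.List.pySetD process r (PySem.List.pySetD row c (1 - PySem.List.pyGetD row c 0)), ans)
  else if PySem.List.pyGetD q 0 0 = 3 then
    let r := PySem.List.pyGetD q 1 0 - 1
    -- for c in range(A): process[r][c] ^= 1
    let process' := (PySem.List.pyRange 0 A 1).foldl
      (fun p c =>
        let row := PySem.List.pyGetD p r []
        PySem.List.pySetD p r (PySem.List.pySetD row c (PySem.Int.bxor (PySem.List.pyGetD row c 0) 1))) process
    (process', ans)
  else
    (process, ans)

def solve (A : Int) (B : List (List Int)) : List Int :=
  let process := List.replicate A.toNat (List.replicate A.toNat (0 : Int))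
  (B.foldl (solveStepA A) (process, [])).2

-- ===== PORT B =====
-- one iteration of B's 'for q in B' loop; state = (grid, total, ans)
def solveStepB (A : Int) (st : List (List Int) × Int × List Int) (q : List Int) :
    List (List Int) × Int × List Int :=
  let grid := st.1
  let total := st.2.1
  let ans := st.2.2
  let t := PySem.List.pyGetD q 0 0
  if t = 1 then
    (grid, total, ans ++ [PySem.Int.mod total 1000000007])
  else if t = 2 then
    let r := PySem.List.pyGetD q 1 0 - 1
    let c := PySem.List.pyGetD q 2 0 - 1
    let row := PySem.List.pyGetD grid r []
    let v := PySem.Int.bxor (PySem.List.pyGetD row c 0) 1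
    (PySem.List.pySetD grid r (PySem.List.pySetD row c v),
     total + (if v ≠ 0 then 1 else -1), ans)
  else if t = 3 then
    let r := PySem.List.pyGetD q 1 0 - 1
    -- for c in range(A): grid[r][c] ^= 1; total += 1 if grid[r][c] else -1
    let gt := (PySem.List.pyRange 0 A 1).foldl
      (fun (gt : List (List Int) × Int) c =>
        let row := PySem.List.pyGetD gt.1 r []
        let v := PySem.Int.bxor (PySem.List.pyGetD row c 0) 1
        (PySem.List.pySetD gt.1 r (PySem.List.pySetD row c v),
         gt.2 + (if v ≠ 0 then 1 else -1))) (grid, total)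
    (gt.1, gt.2, ans)
  else
    st

def solve_alt (A : Int) (B : List (List Int)) : List Int :=
  let grid := List.replicate A.toNat (List.replicate A.toNat (0 : Int))
  (B.foldl (solveStepB A) (grid, 0, [])).2.2

-- ===== PRECONDITION & SPEC =====
-- Pre_ excludes EXACTLY the inputs on which the Python A raises an IndexError:
-- a query row shorter than its type needs, or a type-2/3 query whose (1-based,
-- possibly negative) row/column index falls outside Python's list-index range.
def Pre_solve (A : Int) (B : List (List Int)) : Prop :=
  ∀ q ∈ B, q ≠ [] ∧
    (PySem.List.pyGetD q 0 0 = 2 →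
      3 ≤ q.length ∧ PySem.Raise.InRange A.toNat (PySem.List.pyGetD q 1 0 - 1)
        ∧ PySem.Raise.InRange A.toNat (PySem.List.pyGetD q 2 0 - 1)) ∧
    (PySem.List.pyGetD q 0 0 = 3 →
      2 ≤ q.length ∧ (0 < A → PySem.Raise.InRange A.toNat (PySem.List.pyGetD q 1 0 - 1)))
instance (A : Int) (B : List (List Int)) : Decidable (Pre_solve A B) := by unfold Pre_solve; infer_instance

def pvWitness_solve : Int × List (List Int) := (2, [[1], [2, 1, 2], [3, 2], [2, 0, 0], [1], [7]])

def Spec_solve (A : Int) (B : List (List Int)) (out : List Int) : Prop := out = solve_alt A B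
instance (A : Int) (B : List (List Int)) (out : List Int) : Decidable (Spec_solve A B out) := by unfold Spec_solve; infer_instance

-- ===== CLAIM (what is proved, stated in full; the proofs are below) =====
def Claim_equal_solve : Prop := ∀ (A : Int) (B : List (List Int)), Dom_solve A B → Pre_solve A B → Spec_solve A B (solve A B)

-- ===== LEMMAS AND PROOFS =====

-- Python's resolution of a (possibly negative) in-range index to a Nat position
def pvIdx (n : Nat) (i : Int) : Nat := if 0 ≤ i then i.toNat else n - (-i).toNat

lemma pvIdx_lt {n : Nat} {i : Int} (h : PySem.Raise.InRange n i) : pvIdx n i < n := by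
  obtain ⟨h1, h2⟩ := h
  unfold pvIdx
  split <;> omega

lemma pyIdx_inRange {n : Nat} {i : Int} (h : PySem.Raise.InRange n i) :
    PySem.List.pyIdx? n i = some (pvIdx n i) := by
  obtain ⟨h1, h2⟩ := h
  unfold PySem.List.pyIdx? pvIdx
  split <;> simp_all

lemma pyGetD_inRange {α : Type} (xs : List α) (i : Int) (d : α) (h : PySem.Raise.InRange xs.length i) :
    PySem.List.pyGetD xs i d = xs.getD (pvIdx xs.length i) d := by
  simp [PySem.List.pyGetD, PySem.List.pyGet?, pyIdx_inRange h, List.getD]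

lemma pySetD_inRange {α : Type} (xs : List α) (i : Int) (v : α) (h : PySem.Raise.InRange xs.length i) :
    PySem.List.pySetD xs i v = xs.set (pvIdx xs.length i) v := by
  simp [PySem.List.pySetD, PySem.List.pySet?, pyIdx_inRange h]

lemma getD_set_lt {α : Type} (xs : List α) (j : Nat) (v d : α) (h : j < xs.length) (i : Nat) :
    (xs.set j v).getD i d = if i = j then v else xs.getD i d := by
  rcases lt_or_ge i xs.length with hi | hi
  · rw [List.getD_eq_getElem _ _ (by simpa using hi), List.getD_eq_getElem _ _ hi, List.getElem_set]
    by_cases hij : i = j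
    · simp [hij]
    · simp [hij, Ne.symm hij]
  · rw [List.getD_eq_default _ _ (by simpa using hi), List.getD_eq_default _ _ hi]
    split
    · omega
    · rfl

lemma sum_set_int (xs : List Int) (j : Nat) (v : Int) (h : j < xs.length) :
    (xs.set j v).sum = xs.sum - xs.getD j 0 + v := by
  induction xs generalizing j with
  | nil => simp at h
  | cons x t ih =>
    cases j with
    | zero => simp [List.sum_cons]; ring
    | succ j =>
      simp only [List.set_cons_succ, List.sum_cons, List.getD_cons_succ]
      rw [ih j (by simpa using h)]
      ring

lemma getD_map_lt' {α β : Type} (f : α → β) (xs : List α) (j : Nat) (d : β) (d' : α) (h : j < xs.length) :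
    (xs.map f).getD j d = f (xs.getD j d') := by
  rw [List.getD_eq_getElem _ _ (by simpa using h), List.getD_eq_getElem _ _ h, List.getElem_map]

lemma foldl_mod (M : Int) (hM : 0 < M) (L : List Int) (s : Int) :
    L.foldl (fun a x => PySem.Int.mod (a + x) M) (PySem.Int.mod s M) = PySem.Int.mod (s + L.sum) M := by
  induction L generalizing s with
  | nil => simp
  | cons x t ih =>
    simp only [List.foldl_cons, List.sum_cons]
    have h1 : PySem.Int.mod (PySem.Int.mod s M + x) M = PySem.Int.mod (s + x) M := by
      rw [PySem.Int.mod_eq_emod_of_pos (a := s) hM, PySem.Int.mod_eq_emod_of_pos (a := s % M + x) hM,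
        PySem.Int.mod_eq_emod_of_pos (a := s + x) hM, Int.emod_add_emod]
    rw [h1, ih (s + x)]
    ring_nf

lemma map_range_getD {α : Type} (xs : List α) (d : α) :
    (List.range xs.length).map (fun k => xs.getD k d) = xs := by
  apply List.ext_getElem (by simp)
  intro i h1 h2
  simp [List.getElem?_eq_getElem h2]

-- total number of ones in the materialised matrix
def pvMSum (P : List (List Int)) : Int := (P.map List.sum).sum

-- shape + 0/1-entries invariant on the matrix both programs maintain
def pvGInv (n : Nat) (P : List (List Int)) : Prop :=
  P.length = n ∧ (∀ r < n, (P.getD r []).length = n) ∧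
  (∀ r < n, ∀ c < n, (P.getD r []).getD c 0 = 0 ∨ (P.getD r []).getD c 0 = 1)

lemma pvBxor_one {x : Int} (h : x = 0 ∨ x = 1) : PySem.Int.bxor x 1 = 1 - x := by
  rcases h with rfl | rfl <;> simp [PySem.Int.bxor]

-- setting cell (j,k) of a well-shaped matrix: invariant and total-ones change
lemma pvSet_cell (n : Nat) (P : List (List Int)) (j k : Nat) (v : Int)
    (hInv : pvGInv n P) (hj : j < n) (hk : k < n) (hv : v = 0 ∨ v = 1) :
    pvGInv n (P.set j ((P.getD j []).set k v)) ∧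
    pvMSum (P.set j ((P.getD j []).set k v)) = pvMSum P - (P.getD j []).getD k 0 + v := by
  obtain ⟨hP, hlen, hbits⟩ := hInv
  have hjP : j < P.length := by omega
  have hkR : k < (P.getD j []).length := by rw [hlen j hj]; exact hk
  refine ⟨⟨by simpa using hP, ?_, ?_⟩, ?_⟩
  · intro r hr
    rw [getD_set_lt P _ _ [] hjP r]
    split_ifs with he
    · rw [List.length_set]; exact hlen j hj
    · exact hlen r hr
  · intro r hr c hc
    rw [getD_set_lt P _ _ [] hjP r]
    split_ifs with he
    · subst he
      rw [getD_set_lt _ _ _ 0 hkR c]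
      split_ifs with he2
      · exact hv
      · exact hbits r hr c hc
    · exact hbits r hr c hc
  · unfold pvMSum
    rw [List.map_set, sum_set_int _ _ _ (by rw [List.length_map]; exact hjP),
      getD_map_lt' List.sum P _ 0 [] hjP, sum_set_int _ _ _ hkR]
    ring

-- the xor-toggle step written with py primitives, normalised to List.set form
lemma pvToggle_norm (n : Nat) (P : List (List Int)) (r c : Int)
    (hP : P.length = n) (hrow : (P.getD (pvIdx n r) []).length = n)
    (hr : PySem.Raise.InRange n r) (hc : PySem.Raise.InRange n c) (v : Int) :
    PySem.List.pySetD P r (PySem.List.pySetD (PySem.List.pyGetD P r []) c v)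
      = P.set (pvIdx n r) ((P.getD (pvIdx n r) []).set (pvIdx n c) v) := by
  rw [pyGetD_inRange P r [] (by rw [hP]; exact hr), hP,
    pySetD_inRange _ c v (by rw [hrow]; exact hc), hrow,
    pySetD_inRange P r _ (by rw [hP]; exact hr), hP]

lemma pvGet_norm (n : Nat) (P : List (List Int)) (r c : Int)
    (hP : P.length = n) (hrow : (P.getD (pvIdx n r) []).length = n)
    (hr : PySem.Raise.InRange n r) (hc : PySem.Raise.InRange n c) :
    PySem.List.pyGetD (PySem.List.pyGetD P r []) c 0
      = (P.getD (pvIdx n r) []).getD (pvIdx n c) 0 := by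
  rw [pyGetD_inRange P r [] (by rw [hP]; exact hr), hP,
    pyGetD_inRange _ c 0 (by rw [hrow]; exact hc), hrow]

-- one xor-toggle of an in-range cell: B's ±1 update tracks the total of ones
lemma pvToggle_step (n : Nat) (P : List (List Int)) (r c : Int)
    (hInv : pvGInv n P) (hr : PySem.Raise.InRange n r) (hc : PySem.Raise.InRange n c) :
    (PySem.List.pySetD P r (PySem.List.pySetD (PySem.List.pyGetD P r []) c
        (PySem.Int.bxor (PySem.List.pyGetD (PySem.List.pyGetD P r []) c 0) 1))
      = P.set (pvIdx n r) ((P.getD (pvIdx n r) []).set (pvIdx n c)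
          (PySem.Int.bxor ((P.getD (pvIdx n r) []).getD (pvIdx n c) 0) 1))) ∧
    pvGInv n (P.set (pvIdx n r) ((P.getD (pvIdx n r) []).set (pvIdx n c)
        (PySem.Int.bxor ((P.getD (pvIdx n r) []).getD (pvIdx n c) 0) 1))) ∧
    pvMSum (P.set (pvIdx n r) ((P.getD (pvIdx n r) []).set (pvIdx n c)
        (PySem.Int.bxor ((P.getD (pvIdx n r) []).getD (pvIdx n c) 0) 1)))
      = pvMSum P + (if PySem.Int.bxor ((P.getD (pvIdx n r) []).getD (pvIdx n c) 0) 1 ≠ 0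
          then 1 else -1) := by
  have hj := pvIdx_lt hr
  have hk := pvIdx_lt hc
  have hrow := hInv.2.1 _ hj
  have hold := hInv.2.2 _ hj _ hk
  have hv : PySem.Int.bxor ((P.getD (pvIdx n r) []).getD (pvIdx n c) 0) 1 = 0 ∨
      PySem.Int.bxor ((P.getD (pvIdx n r) []).getD (pvIdx n c) 0) 1 = 1 := by
    rcases hold with h | h <;> rw [h] <;> simp [PySem.Int.bxor]
  obtain ⟨hInv', hsum⟩ := pvSet_cell n P (pvIdx n r) (pvIdx n c) _ hInv hj hk hv
  refine ⟨?_, hInv', ?_⟩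
  · rw [pvToggle_norm n P r c hInv.1 hrow hr hc, pvGet_norm n P r c hInv.1 hrow hr hc]
  · rw [hsum]
    rcases hold with h | h <;> rw [h] <;> simp [PySem.Int.bxor] <;> ring

-- B's inner row-flip fold tracks A's: same grid, total = total of ones
lemma pvInnerFold (n : Nat) (r : Int) (hr : PySem.Raise.InRange n r)
    (L : List Int) (hL : ∀ c ∈ L, PySem.Raise.InRange n c)
    (P : List (List Int)) (t : Int) (hInv : pvGInv n P) (ht : t = pvMSum P) :
    (L.foldl (fun (gt : List (List Int) × Int) c =>
        let row := PySem.List.pyGetD gt.1 r []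
        let v := PySem.Int.bxor (PySem.List.pyGetD row c 0) 1
        (PySem.List.pySetD gt.1 r (PySem.List.pySetD row c v),
         gt.2 + (if v ≠ 0 then 1 else -1))) (P, t)).1
      = L.foldl (fun p c =>
        let row := PySem.List.pyGetD p r []
        PySem.List.pySetD p r (PySem.List.pySetD row c (PySem.Int.bxor (PySem.List.pyGetD row c 0) 1))) P ∧
    pvGInv n (L.foldl (fun p c =>
        let row := PySem.List.pyGetD p r []
        PySem.List.pySetD p r (PySem.List.pySetD row c (PySem.Int.bxor (PySem.List.pyGetD row c 0) 1))) P) ∧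
    (L.foldl (fun (gt : List (List Int) × Int) c =>
        let row := PySem.List.pyGetD gt.1 r []
        let v := PySem.Int.bxor (PySem.List.pyGetD row c 0) 1
        (PySem.List.pySetD gt.1 r (PySem.List.pySetD row c v),
         gt.2 + (if v ≠ 0 then 1 else -1))) (P, t)).2
      = pvMSum (L.foldl (fun p c =>
        let row := PySem.List.pyGetD p r []
        PySem.List.pySetD p r (PySem.List.pySetD row c (PySem.Int.bxor (PySem.List.pyGetD row c 0) 1))) P) := by
  induction L generalizing P t with
  | nil => exact ⟨rfl, hInv, ht⟩
  | cons c L ih =>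
    obtain ⟨heq, hInv', hsum⟩ := pvToggle_step n P r c hInv hr (hL c (by simp))
    simp only [List.foldl_cons]
    rw [heq]
    exact ih (fun c' hc' => hL c' (by simp [hc'])) _ _ hInv'
      (by rw [ht, hsum, pvGet_norm n P r c hInv.1 (hInv.2.1 _ (pvIdx_lt hr)) hr (hL c (by simp))])

-- one query step: B's state = (A's grid, its total of ones, A's answers)
lemma pvStep_main (A : Int) (P : List (List Int)) (total : Int) (ans : List Int) (q : List Int)
    (hq : q ≠ [] ∧
      (PySem.List.pyGetD q 0 0 = 2 → 3 ≤ q.length ∧ PySem.Raise.InRange A.toNat (PySem.List.pyGetD q 1 0 - 1)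
        ∧ PySem.Raise.InRange A.toNat (PySem.List.pyGetD q 2 0 - 1)) ∧
      (PySem.List.pyGetD q 0 0 = 3 → 2 ≤ q.length ∧ (0 < A → PySem.Raise.InRange A.toNat (PySem.List.pyGetD q 1 0 - 1))))
    (hInv : pvGInv A.toNat P) (ht : total = pvMSum P) :
    solveStepB A (P, total, ans) q
      = ((solveStepA A (P, ans) q).1, pvMSum (solveStepA A (P, ans) q).1, (solveStepA A (P, ans) q).2) ∧
    pvGInv A.toNat (solveStepA A (P, ans) q).1 := by
  obtain ⟨hqne, hq2, hq3⟩ := hq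
  obtain ⟨hP, hlen, hbits⟩ := hInv
  by_cases h1 : PySem.List.pyGetD q 0 0 = 1
  · -- sum query: A's full rescan mod-fold equals total % mod
    have hsum : (PySem.List.pyRange 0 A 1).foldl
        (fun s a => PySem.Int.mod (s + (PySem.List.pyGetD P a []).sum) 1000000007) 0
        = PySem.Int.mod total 1000000007 := by
      rw [ht]
      by_cases hA : A ≤ 0
      · have hn0 : A.toNat = 0 := Int.toNat_of_nonpos hA
        have hPnil : P = [] := List.length_eq_zero_iff.mp (by omega)
        rw [PySem.List.pyRange_one_eq_nil (by omega), List.foldl_nil, hPnil]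
        norm_num [PySem.Int.mod, pvMSum]
      · have hA' : A = (A.toNat : Int) := (Int.toNat_of_nonneg (by omega)).symm
        rw [hA', PySem.List.pyRange_one]
        have : ((A.toNat : Int) - 0).toNat = A.toNat := by omega
        rw [this, List.foldl_map]
        simp only [zero_add, PySem.List.pyGetD_natCast]
        rw [← hP]
        rw [← List.foldl_map (f := fun k : Nat => P.getD k [])
          (g := fun (s : Int) (row : List Int) => PySem.Int.mod (s + row.sum) 1000000007)]
        rw [map_range_getD P []]
        rw [← List.foldl_map (f := List.sum)
          (g := fun (s x : Int) => PySem.Int.mod (s + x) 1000000007)]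
        have h0 : PySem.Int.mod 0 1000000007 = 0 := by norm_num [PySem.Int.mod]
        have hm := foldl_mod 1000000007 (by norm_num) (P.map List.sum) 0
        rw [h0, zero_add] at hm
        exact hm
    constructor
    · simp only [solveStepA, solveStepB, if_pos h1]
      rw [hsum, ht]
    · simp only [solveStepA, if_pos h1]
      exact ⟨hP, hlen, hbits⟩
  by_cases h2 : PySem.List.pyGetD q 0 0 = 2
  · -- cell toggle: A writes 1 - old, B writes old ^ 1 and adjusts total
    obtain ⟨hlen3, hr, hc⟩ := hq2 h2
    have hj := pvIdx_lt hr
    have hk := pvIdx_lt hc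
    have hold := hbits _ hj _ hk
    obtain ⟨heq, hInv', hsum⟩ := pvToggle_step A.toNat P _ _ ⟨hP, hlen, hbits⟩ hr hc
    have hval : (1 : Int) - PySem.List.pyGetD (PySem.List.pyGetD P (PySem.List.pyGetD q 1 0 - 1) [])
        (PySem.List.pyGetD q 2 0 - 1) 0
        = PySem.Int.bxor (PySem.List.pyGetD (PySem.List.pyGetD P (PySem.List.pyGetD q 1 0 - 1) [])
            (PySem.List.pyGetD q 2 0 - 1) 0) 1 := by
      rw [pvGet_norm A.toNat P _ _ hP (hlen _ hj) hr hc, pvBxor_one hold]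
    constructor
    · simp only [solveStepA, solveStepB, if_neg h1, if_pos h2]
      rw [hval, heq, hsum, ht, pvGet_norm A.toNat P _ _ hP (hlen _ hj) hr hc]
    · simp only [solveStepA, if_neg h1, if_pos h2]
      rw [hval, heq]
      exact hInv'
  by_cases h3 : PySem.List.pyGetD q 0 0 = 3
  · -- row flip: B's inner fold produces A's grid and its total of ones
    obtain ⟨hlen2, hrA⟩ := hq3 h3
    by_cases hApos : 0 < A
    · have hr := hrA hApos
      have hL : ∀ c ∈ PySem.List.pyRange 0 A 1, PySem.Raise.InRange A.toNat c := by
        intro c hcL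
        rw [PySem.List.mem_pyRange_one] at hcL
        exact ⟨by omega, by omega⟩
      obtain ⟨hg, hInv', hsum⟩ := pvInnerFold A.toNat _ hr (PySem.List.pyRange 0 A 1) hL P total
        ⟨hP, hlen, hbits⟩ ht
      constructor
      · simp only [solveStepA, solveStepB, if_neg h1, if_neg h2, if_pos h3]
        rw [hg, hsum]
      · simp only [solveStepA, if_neg h1, if_neg h2, if_pos h3]
        exact hInv'
    · constructor
      · simp only [solveStepA, solveStepB, if_neg h1, if_neg h2, if_pos h3]
        rw [PySem.List.pyRange_one_eq_nil (by omega)]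
        simp [ht]
      · simp only [solveStepA, if_neg h1, if_neg h2, if_pos h3]
        rw [PySem.List.pyRange_one_eq_nil (by omega), List.foldl_nil]
        exact ⟨hP, hlen, hbits⟩
  · constructor
    · simp only [solveStepA, solveStepB, if_neg h1, if_neg h2, if_neg h3]
      rw [ht]
    · simp only [solveStepA, if_neg h1, if_neg h2, if_neg h3]
      exact ⟨hP, hlen, hbits⟩

lemma pvFold (A : Int) (qs : List (List Int)) (P : List (List Int)) (total : Int) (ans : List Int)
    (hq : ∀ q ∈ qs, q ≠ [] ∧
      (PySem.List.pyGetD q 0 0 = 2 → 3 ≤ q.length ∧ PySem.Raise.InRange A.toNat (PySem.List.pyGetD q 1 0 - 1)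
        ∧ PySem.Raise.InRange A.toNat (PySem.List.pyGetD q 2 0 - 1)) ∧
      (PySem.List.pyGetD q 0 0 = 3 → 2 ≤ q.length ∧ (0 < A → PySem.Raise.InRange A.toNat (PySem.List.pyGetD q 1 0 - 1))))
    (hInv : pvGInv A.toNat P) (ht : total = pvMSum P) :
    (qs.foldl (solveStepB A) (P, total, ans)).2.2 = (qs.foldl (solveStepA A) (P, ans)).2 := by
  induction qs generalizing P total ans with
  | nil => rfl
  | cons q qs ih =>
    obtain ⟨heq, hInv'⟩ := pvStep_main A P total ans q (hq q (by simp)) hInv ht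
    simp only [List.foldl_cons]
    rw [heq]
    have h2 : qs.foldl (solveStepA A) (solveStepA A (P, ans) q)
        = qs.foldl (solveStepA A) ((solveStepA A (P, ans) q).1, (solveStepA A (P, ans) q).2) := by simp
    rw [h2]
    exact ih _ _ _ (fun p hp => hq p (by simp [hp])) hInv' rfl

lemma pvInit (A : Int) :
    pvGInv A.toNat (List.replicate A.toNat (List.replicate A.toNat (0 : Int))) ∧
    (0 : Int) = pvMSum (List.replicate A.toNat (List.replicate A.toNat (0 : Int))) := by
  refine ⟨⟨by simp, ?_, ?_⟩, by simp [pvMSum, List.sum_replicate]⟩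
  · intro r hr
    simp [List.getD, hr]
  · intro r hr c hc
    simp [List.getD, hr, hc]

-- ===== VERDICT (by name: the statement is the Claim_ definition above) =====
theorem solve_spec : Claim_equal_solve := by
  intro A B hdom hpre
  unfold Spec_solve solve solve_alt
  obtain ⟨hInv, ht⟩ := pvInit A
  exact (pvFold A B _ 0 [] hpre hInv ht).symm
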